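-- pv_equiv track=rewrite | github.com/aabhishek-chaurasia-au17/MyCoding_Challenge | coding-challenges/week10/day03/Q.3.py | perform_XOR
-- ===== SOURCE A (Python) =====
-- def perform_XOR(x, y):
-- 	res = 0
--
-- 	for i in range(31, -1, -1):
--
-- 		b1 = x & (1 << i)
-- 		b2 = y & (1 << i)
-- 		b1 = min(b1, 1)
-- 		b2 = min(b2, 1)
--
-- 		xorOP = 0
-- 		if (b1 & b2):
-- 			xorOP = 0
-- 		else:
-- 			xorOP = (b1 | b2)
--
-- 		res <<= 1;
-- 		res |= xorOP
-- 	return res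
-- ===== SOURCE B (Python) =====
-- def perform_XOR(x, y):
--     # closed form: native XOR truncated to the low 32 bits (what A's bit loop builds)
--     return (x ^ y) & 0xFFFFFFFF
-- ===== Notes on version B (the rewrite author's own statement) =====
-- stated objective: simpler
-- what changed: replaces the 32-iteration MSB-first bit-reconstruction loop (per-bit masking, min-normalisation, branch, shift-or accumulate) by the single closed-form expression (x ^ y) & 0xFFFFFFFF
import Mathlib
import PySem

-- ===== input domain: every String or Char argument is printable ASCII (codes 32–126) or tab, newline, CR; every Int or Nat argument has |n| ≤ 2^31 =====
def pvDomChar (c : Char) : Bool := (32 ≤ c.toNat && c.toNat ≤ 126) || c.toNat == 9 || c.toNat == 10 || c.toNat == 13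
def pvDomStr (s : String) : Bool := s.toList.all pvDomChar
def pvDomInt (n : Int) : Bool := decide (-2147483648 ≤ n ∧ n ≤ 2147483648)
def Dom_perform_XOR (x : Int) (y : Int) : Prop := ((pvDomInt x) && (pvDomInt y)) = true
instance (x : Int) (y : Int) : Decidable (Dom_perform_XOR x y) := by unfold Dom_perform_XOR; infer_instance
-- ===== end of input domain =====

-- B replaces A's 32-iteration bit-reconstruction loop by the closed form (x ^ y) & 0xFFFFFFFF (simpler).

-- ===== PORT A =====
-- the body of A's `for i in range(31, -1, -1)` loop, kept as a named helper for the fold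
-- (i is nonnegative throughout the range, so `.toNat` on the shift amount is exact)
def pvStep (x y : Int) (res : Int) (i : Int) : Int :=
  let b1 := PySem.Int.band x ((1 : Int) <<< i.toNat)
  let b2 := PySem.Int.band y ((1 : Int) <<< i.toNat)
  let b1 := min b1 1
  let b2 := min b2 1
  let xorOP : Int := 0
  let xorOP := if PySem.Int.band b1 b2 ≠ 0 then (0 : Int) else PySem.Int.bor b1 b2
  let res := res <<< (1 : Nat)
  let res := PySem.Int.bor res xorOP
  res

def perform_XOR (x : Int) (y : Int) : Int :=
  (PySem.List.pyRange 31 (-1) (-1)).foldl (pvStep x y) 0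

-- ===== PORT B =====
def perform_XOR_alt (x : Int) (y : Int) : Int :=
  PySem.Int.band (PySem.Int.bxor x y) 4294967295

-- ===== PRECONDITION & SPEC =====
def Spec_perform_XOR (x : Int) (y : Int) (out : Int) : Prop := out = perform_XOR_alt x y
instance (x : Int) (y : Int) (out : Int) : Decidable (Spec_perform_XOR x y out) := by unfold Spec_perform_XOR; infer_instance

-- ===== CLAIM (what is proved, stated in full; the proofs are below) =====
def Claim_equal_perform_XOR : Prop := ∀ (x : Int) (y : Int), Dom_perform_XOR x y → Spec_perform_XOR x y (perform_XOR x y)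

-- ===== LEMMAS AND PROOFS =====

-- bit i of z in Python's infinite two's complement
def pvBit (z : Int) (i : Nat) : Bool :=
  if 0 ≤ z then z.toNat.testBit i else !((-z - 1).toNat.testBit i)

theorem pv_shl_one (i : Nat) : (1 : Int) <<< i = 2 ^ i := by
  rw [Int.shiftLeft_eq]; ring

theorem pv_two_pow_cast (i : Nat) : ((2 : Int) ^ i) = ((2 ^ i : Nat) : Int) := by push_cast; ring

theorem pv_cast_mod (n j : Nat) : ((n : Int)) % 2 ^ j = ((n % 2 ^ j : Nat) : Int) := by
  rw [pv_two_pow_cast, Int.natCast_mod]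

theorem pv_band_two_pow (z : Int) (i : Nat) :
    PySem.Int.band z (2 ^ i) = if pvBit z i then 2 ^ i else 0 := by
  have hp : (0 : Int) ≤ 2 ^ i := by positivity
  have ht : ((2 : Int) ^ i).toNat = 2 ^ i := by rw [pv_two_pow_cast, Int.toNat_natCast]
  unfold PySem.Int.band pvBit
  by_cases hz : 0 ≤ z
  · rw [if_pos hz, if_pos hz, if_pos hp, ht, Nat.and_two_pow]
    cases h : z.toNat.testBit i
    · simp
    · simp
  · rw [if_neg hz, if_neg hz, if_pos hp, ht, Nat.two_pow_and]
    cases h : (-z - 1).toNat.testBit i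
    · simp
    · simp

theorem pv_bxor_bit (x y : Int) (i : Nat) :
    pvBit (PySem.Int.bxor x y) i = ((pvBit x i).xor (pvBit y i)) := by
  unfold PySem.Int.bxor pvBit
  by_cases hx : 0 ≤ x <;> by_cases hy : 0 ≤ y
  · rw [if_pos hx, if_pos hx, if_pos hy, if_pos hy,
      if_pos (Int.natCast_nonneg (x.toNat ^^^ y.toNat)), Int.toNat_natCast, Nat.testBit_xor]
  · have h : ¬ (0 : Int) ≤ -↑(x.toNat ^^^ (-y - 1).toNat) - 1 := by
      have := Int.natCast_nonneg (x.toNat ^^^ (-y - 1).toNat); omega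
    have h2 : (-(-(↑(x.toNat ^^^ (-y - 1).toNat) : Int) - 1) - 1).toNat
        = x.toNat ^^^ (-y - 1).toNat := by omega
    rw [if_pos hx, if_pos hx, if_neg hy, if_neg hy, if_neg h, h2, Nat.testBit_xor]
    cases x.toNat.testBit i <;> cases (-y - 1).toNat.testBit i <;> rfl
  · have h : ¬ (0 : Int) ≤ -↑((-x - 1).toNat ^^^ y.toNat) - 1 := by
      have := Int.natCast_nonneg ((-x - 1).toNat ^^^ y.toNat); omega
    have h2 : (-(-(↑((-x - 1).toNat ^^^ y.toNat) : Int) - 1) - 1).toNat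
        = (-x - 1).toNat ^^^ y.toNat := by omega
    rw [if_neg hx, if_neg hx, if_pos hy, if_pos hy, if_neg h, h2, Nat.testBit_xor]
    cases (-x - 1).toNat.testBit i <;> cases y.toNat.testBit i <;> rfl
  · rw [if_neg hx, if_neg hx, if_neg hy, if_neg hy,
      if_pos (Int.natCast_nonneg ((-x - 1).toNat ^^^ (-y - 1).toNat)), Int.toNat_natCast,
      Nat.testBit_xor]
    cases (-x - 1).toNat.testBit i <;> cases (-y - 1).toNat.testBit i <;> rfl

theorem pv_nat_mod_pow_succ (n k : Nat) :
    n % 2 ^ (k + 1) = n % 2 ^ k + 2 ^ k * (n.testBit k).toNat := by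
  have ht : (n.testBit k).toNat = n / 2 ^ k % 2 := Nat.toNat_testBit n k
  rw [Nat.mod_pow_succ, ht, Nat.add_comm]

theorem pv_neg_mod (m : Nat) (j : Nat) :
    ((-(m : Int) - 1) % 2 ^ j) = (2 ^ j : Int) - 1 - ↑(m % 2 ^ j) := by
  have hd := Nat.div_add_mod m (2 ^ j)
  have hlt : m % 2 ^ j < 2 ^ j := Nat.mod_lt _ (Nat.pow_pos (by norm_num))
  have hm' : (m : Int) = (2 : Int) ^ j * ((m / 2 ^ j : Nat) : Int) + ((m % 2 ^ j : Nat) : Int) := by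
    rw [pv_two_pow_cast, ← Int.natCast_mul, ← Int.natCast_add, hd]
  have key : (-(m : Int) - 1) =
      ((2 : Int) ^ j - 1 - ↑(m % 2 ^ j)) + 2 ^ j * (-(↑(m / 2 ^ j)) - 1) := by
    conv_lhs => rw [hm']
    ring
  rw [key, Int.add_mul_emod_self_left]
  apply Int.emod_eq_of_lt
  · rw [pv_two_pow_cast]; omega
  · rw [pv_two_pow_cast]; omega

theorem pv_mod_split (z : Int) (k : Nat) :
    z % 2 ^ (k + 1) = z % 2 ^ k + (if pvBit z k then 2 ^ k else 0) := by
  unfold pvBit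
  by_cases hz : 0 ≤ z
  · rw [if_pos hz]
    have h1 := pv_nat_mod_pow_succ z.toNat k
    cases h : z.toNat.testBit k <;> rw [h] at h1 <;>
      simp only [Bool.toNat_false, Bool.toNat_true, Nat.mul_zero, Nat.mul_one] at h1 <;>
      [rw [if_neg (by decide)]; rw [if_pos rfl]] <;>
      rw [← Int.toNat_of_nonneg hz, pv_cast_mod, pv_cast_mod] <;>
      (try simp only [pv_two_pow_cast]) <;> omega
  · rw [if_neg hz]
    have hm : z = -(((-z - 1).toNat : Int)) - 1 := by omega
    have h1 := pv_nat_mod_pow_succ (-z - 1).toNat k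
    cases h : (-z - 1).toNat.testBit k <;> rw [h] at h1 <;>
      simp only [Bool.toNat_false, Bool.toNat_true, Nat.mul_zero, Nat.mul_one] at h1 <;>
      [rw [if_pos (by decide)]; rw [if_neg (by decide)]] <;>
      rw [hm, pv_neg_mod, pv_neg_mod] <;>
      (try simp only [pv_two_pow_cast]) <;> omega

theorem pv_band_mask (z : Int) : PySem.Int.band z 4294967295 = z % 4294967296 := by
  have hmask : (4294967295 : Int).toNat = 2 ^ 32 - 1 := by
    rw [show (4294967295 : Int).toNat = 4294967295 from rfl]; norm_num
  have hm32 : (4294967296 : Int) = 2 ^ 32 := by norm_num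
  unfold PySem.Int.band
  by_cases hz : 0 ≤ z
  · rw [if_pos hz, if_pos (by norm_num : (0:Int) ≤ 4294967295), hmask,
        Nat.and_two_pow_sub_one_eq_mod]
    conv_rhs => rw [← Int.toNat_of_nonneg hz, hm32, pv_cast_mod]
  · rw [if_neg hz, if_pos (by norm_num : (0:Int) ≤ 4294967295), hmask,
        Nat.land_comm, Nat.and_two_pow_sub_one_eq_mod]
    have hm : z = -((( -z - 1).toNat : Int)) - 1 := by omega
    conv_rhs => rw [hm, hm32, pv_neg_mod]
    have hlt : (-z - 1).toNat % 2 ^ 32 < 2 ^ 32 := Nat.mod_lt _ (by norm_num)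
    have hle : (-z - 1).toNat % 2 ^ 32 ≤ 2 ^ 32 - 1 := by omega
    omega

theorem pv_nat_or_one (k : Nat) : 2 * k ||| 1 = 2 * k + 1 := by
  apply Nat.eq_of_testBit_eq; intro i
  rw [Nat.testBit_lor]
  cases i with
  | zero => simp [Nat.testBit_zero]
  | succ j => simp [Nat.testBit_succ]; congr 1; omega

theorem pv_bor_two_mul_one (r : Int) : PySem.Int.bor (2 * r) 1 = 2 * r + 1 := by
  unfold PySem.Int.bor
  by_cases hr : 0 ≤ 2 * r
  · rw [if_pos hr, if_pos (by norm_num : (0:Int) ≤ 1)]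
    have h2 : (2 * r).toNat = 2 * r.toNat := by omega
    have h1 : (1 : Int).toNat = 1 := rfl
    rw [h2, h1, pv_nat_or_one]; omega
  · rw [if_neg hr, if_pos (by norm_num : (0:Int) ≤ 1)]
    have h1 : (1 : Int).toNat = 1 := rfl
    rw [h1, Nat.and_one_is_mod]
    have hodd : (-(2 * r) - 1).toNat % 2 = 1 := by omega
    rw [hodd]; omega

theorem pv_step_eq (x y r : Int) (n : Nat) :
    pvStep x y r ((n : Int)) = 2 * r + (if pvBit (PySem.Int.bxor x y) n then 1 else 0) := by
  have hone : (1 : Int) ≤ 2 ^ n := one_le_pow₀ (by norm_num)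
  have hshl : r <<< (1 : Nat) = 2 * r := by rw [Int.shiftLeft_eq]; ring
  have hmin1 : min ((2 : Int) ^ n) 1 = 1 := min_eq_right hone
  have hband01 : PySem.Int.band 0 1 = 0 := by decide
  have hband10 : PySem.Int.band 1 0 = 0 := by decide
  have hbor00 : PySem.Int.bor 0 0 = 0 := by decide
  have hbor01 : PySem.Int.bor 0 1 = 1 := by decide
  have hbor10 : PySem.Int.bor 1 0 = 1 := by decide
  simp only [pvStep]
  rw [Int.toNat_natCast, pv_shl_one, pv_band_two_pow, pv_band_two_pow, pv_bxor_bit]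
  cases hx : pvBit x n <;> cases hy : pvBit y n <;>
    simp [hmin1, hband01, hband10, hbor00, hbor01, hbor10,
      hshl, pv_bor_two_mul_one, PySem.Int.bor_zero]

theorem pv_fold (x y : Int) (n : Nat) : ∀ (r : Int),
    ((List.range n).reverse).foldl (fun (r : Int) (k : Nat) => pvStep x y r ((k : Int))) r
      = r * 2 ^ n + (PySem.Int.bxor x y) % 2 ^ n := by
  induction n with
  | zero => intro r; simp
  | succ k ih =>
    intro r
    have hrev : (List.range (k + 1)).reverse = k :: (List.range k).reverse := by
      rw [List.range_succ]; simp
    rw [hrev, List.foldl_cons, pv_step_eq, ih, pv_mod_split]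
    cases h : pvBit (PySem.Int.bxor x y) k <;> norm_num <;> (try ring)

theorem pv_range_eq :
    PySem.List.pyRange 31 (-1) (-1) = List.map (fun (k : Nat) => (k : Int)) ((List.range 32).reverse) := by
  decide

-- ===== VERDICT (by name: the statement is the Claim_ definition above) =====
theorem perform_XOR_spec : Claim_equal_perform_XOR := by
  intro x y _
  show perform_XOR x y = perform_XOR_alt x y
  unfold perform_XOR perform_XOR_alt
  rw [pv_range_eq]
  simp only [List.foldl_map]
  rw [pv_fold, pv_band_mask]
  norm_num
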